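-- pv_equiv track=rewrite | github.com/or-mihai-or-gheorghe/CS-Foundations-Tools | tools/multi_format_converter.py | _int_to_ones
-- ===== SOURCE A (Python) =====
-- def _int_to_ones(val: int, width: int, negative_zero: bool = False) -> tuple[str, bool]:
--     """
--     Encode integer in one's complement with given width.
--     If val==0 and negative_zero=True, returns all ones.
--     Returns (bits, overflow_flag).
--     """
--     max_pos = (1 << (width - 1)) - 1
--     min_neg = -max_pos
--     overflow = val > max_pos or val < min_neg
--     mask = (1 << width) - 1
--     if val == 0:
--         return ("1" * width) if negative_zero else ("0" * width), overflow
--     if val > 0: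
--         return format(val & mask, f"0{width}b"), overflow
--     # negative: invert magnitude
--     mag = -val
--     bits = format(mag & mask, f"0{width}b")
--     inv = "".join("1" if b == "0" else "0" for b in bits)
--     return inv, overflow
-- ===== SOURCE B (Python) =====
-- _BYTE_BITS = [format(i, "08b") for i in range(256)]
--
-- def _int_to_ones(val: int, width: int, negative_zero: bool = False) -> tuple[str, bool]:
--     mask = (1 << width) - 1
--     max_pos = mask >> 1
--     overflow = not (-max_pos <= val <= max_pos)
--     if val == 0:
--         code = mask if negative_zero else 0
--     elif val > 0:
--         code = val & mask
--     else:
--         code = mask - ((-val) & mask)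
--     raw = "".join(_BYTE_BITS[b] for b in code.to_bytes((width + 7) // 8, "big"))
--     return raw[-width:], overflow
-- ===== Notes on version B (the rewrite author's own statement) =====
-- stated objective: alternative
-- what changed: B computes an integer code arithmetically per branch (mask for negative zero, val & mask, mask minus masked magnitude for the one's complement) and renders it via code.to_bytes plus a precomputed 256-entry byte-to-bits table and one negative slice, replacing A's per-value format() call, string replication and character-inversion comprehension.
import Mathlib
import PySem

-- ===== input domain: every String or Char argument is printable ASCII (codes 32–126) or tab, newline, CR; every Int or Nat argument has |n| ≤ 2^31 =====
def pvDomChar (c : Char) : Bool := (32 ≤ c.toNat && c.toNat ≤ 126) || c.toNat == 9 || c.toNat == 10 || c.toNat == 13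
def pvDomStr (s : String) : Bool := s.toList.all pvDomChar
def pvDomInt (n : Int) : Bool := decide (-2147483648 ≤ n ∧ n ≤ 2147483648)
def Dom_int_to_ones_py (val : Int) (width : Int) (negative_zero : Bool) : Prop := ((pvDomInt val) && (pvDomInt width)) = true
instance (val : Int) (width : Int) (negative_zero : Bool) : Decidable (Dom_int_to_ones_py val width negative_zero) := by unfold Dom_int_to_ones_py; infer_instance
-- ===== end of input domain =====

-- B computes the code arithmetically per branch, then renders it through code.to_bytes and a 256-entry byte->bits table plus one negative slice, replacing A's per-value format(), string replication and character-inversion comprehension.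


-- ===== PORT A =====
-- binary digits of n, most significant first (empty for 0); hand port of the core of Python's format(n, 'b') — exact for n : Nat
-- (structural recursion on a fuel counter ≥ n so the kernel can evaluate it; the natural recurrence is recovered in the proofs)
def binCharsGo : Nat → Nat → List Char
  | 0, _ => []
  | fuel+1, n => if n = 0 then [] else binCharsGo fuel (n/2) ++ [if n % 2 = 1 then '1' else '0']

def binChars (n : Nat) : List Char := binCharsGo n n

-- format(n, f"0{w}b"): binary representation of n, zero-padded on the left to w characters — exact for n w : Nat
def pyFormatBin (n : Nat) (w : Nat) : String :=
  let s := if n = 0 then ['0'] else binChars n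
  String.ofList (List.replicate (w - s.length) '0' ++ s)

def int_to_ones_py (val : Int) (width : Int) (negative_zero : Bool) : String × Bool :=
  let maxPos : Int := 2 ^ (width - 1).toNat - 1   -- (1 << (width-1)) - 1; exact for width ≥ 1 (Pre_); Python raises for width ≤ 0
  let minNeg : Int := -maxPos
  let overflow : Bool := decide (val > maxPos) || decide (val < minNeg)
  let mask : Nat := 2 ^ width.toNat - 1
  if val = 0 then
    ((if negative_zero then String.ofList (List.replicate width.toNat '1')
      else String.ofList (List.replicate width.toNat '0')), overflow)
  else if val > 0 then
    (pyFormatBin (val.toNat &&& mask) width.toNat, overflow)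
  else
    let mag : Int := -val
    let bits := pyFormatBin (mag.toNat &&& mask) width.toNat
    let inv := String.ofList (bits.toList.map (fun b => if b == '0' then '1' else '0'))
    (inv, overflow)

-- ===== PORT B =====
-- _BYTE_BITS[b] = format(b, "08b") for 0 ≤ b < 256 (the module-level table of Source B)
def byteBitsTable (b : Nat) : List Char := (pyFormatBin b 8).toList

-- code.to_bytes(k, "big"): the k bytes of code, most significant first — exact for code < 256^k (Python raises OverflowError otherwise)
def toBytesBE : Nat → Nat → List Nat
  | 0, _ => []
  | k+1, n => toBytesBE k (n / 256) ++ [n % 256]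

def int_to_ones_py_alt (val : Int) (width : Int) (negative_zero : Bool) : String × Bool :=
  let mask : Nat := 2 ^ width.toNat - 1             -- (1 << width) - 1; exact for width ≥ 1 (Pre_)
  let maxPos : Nat := mask >>> 1
  let overflow : Bool := !decide (-(maxPos : Int) ≤ val ∧ val ≤ (maxPos : Int))
  let code : Nat :=
    if val = 0 then (if negative_zero then mask else 0)
    else if val > 0 then val.toNat &&& mask
    else mask - ((-val).toNat &&& mask)
  let raw : List Char := (toBytesBE ((width.toNat + 7) / 8) code).flatMap byteBitsTable   -- "".join(_BYTE_BITS[b] for b in code.to_bytes((width+7)//8, "big"))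
  (String.ofList (PySem.List.slice raw (some (-width)) none), overflow)                   -- raw[-width:]

-- ===== PRECONDITION & SPEC =====
-- Pre_ excludes width ≤ 0, on which Python A raises ValueError (negative shift count in 1 << (width - 1)).
def Pre_int_to_ones_py (val : Int) (width : Int) (negative_zero : Bool) : Prop := 1 ≤ width
instance (val : Int) (width : Int) (negative_zero : Bool) : Decidable (Pre_int_to_ones_py val width negative_zero) := by unfold Pre_int_to_ones_py; infer_instance

def pvWitness_int_to_ones_py : Int × Int × Bool := (-5, 4, false)

def Spec_int_to_ones_py (val : Int) (width : Int) (negative_zero : Bool) (out : String × Bool) : Prop := out = int_to_ones_py_alt val width negative_zero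
instance (val : Int) (width : Int) (negative_zero : Bool) (out : String × Bool) : Decidable (Spec_int_to_ones_py val width negative_zero out) := by unfold Spec_int_to_ones_py; infer_instance

-- ===== CLAIM (what is proved, stated in full; the proofs are below) =====
def Claim_equal_int_to_ones_py : Prop := ∀ (val : Int) (width : Int) (negative_zero : Bool), Dom_int_to_ones_py val width negative_zero → Pre_int_to_ones_py val width negative_zero → Spec_int_to_ones_py val width negative_zero (int_to_ones_py val width negative_zero)

-- ===== LEMMAS AND PROOFS =====

theorem binCharsGo_congr : ∀ (f g n : Nat), n ≤ f → n ≤ g → binCharsGo f n = binCharsGo g n := by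
  intro f
  induction f with
  | zero => intro g n h1 _; interval_cases n; cases g <;> simp [binCharsGo]
  | succ f ih =>
    intro g n h1 h2
    by_cases h0 : n = 0
    · subst h0; cases g <;> simp [binCharsGo]
    · obtain ⟨g', rfl⟩ : ∃ g', g = g' + 1 := ⟨g - 1, by omega⟩
      simp only [binCharsGo, if_neg h0]
      rw [ih g' (n/2) (by omega) (by omega)]

-- the exact w-bit binary string of n (for n < 2^w), most significant first: proof-side characterisation of both emissions
def bitsN : Nat → Nat → List Char
  | 0, _ => []
  | w+1, n => bitsN w (n/2) ++ [if n % 2 = 1 then '1' else '0']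

theorem bitsN_zero (w : Nat) : bitsN w 0 = List.replicate w '0' := by
  induction w with
  | zero => rfl
  | succ w ih => simp [bitsN, ih, List.replicate_succ' (n := w)]

theorem bitsN_length (w : Nat) : ∀ n, (bitsN w n).length = w := by
  induction w with
  | zero => intro n; rfl
  | succ w ih => intro n; simp [bitsN, ih]

theorem bitsN_add (a b : Nat) : ∀ n, bitsN (a + b) n = bitsN a (n / 2 ^ b) ++ bitsN b (n % 2 ^ b) := by
  induction b with
  | zero => intro n; simp [bitsN]
  | succ b ih =>
    intro n
    have h1 : n / 2 / 2 ^ b = n / 2 ^ (b + 1) := by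
      rw [Nat.div_div_eq_div_mul, pow_succ, Nat.mul_comm]
    have h2 : n % 2 ^ (b + 1) / 2 = n / 2 % 2 ^ b := by
      rw [pow_succ, Nat.mul_comm (2 ^ b) 2, Nat.mod_mul_right_div_self]
    have h3 : n % 2 ^ (b + 1) % 2 = n % 2 := by
      exact Nat.mod_mod_of_dvd n ⟨2 ^ b, by ring⟩
    show bitsN (a + b) (n / 2) ++ _ = _
    rw [ih (n / 2), h1]
    simp only [bitsN, h2, h3, List.append_assoc]

theorem binChars_pos (n : Nat) (h : 0 < n) :
    binChars n = binChars (n/2) ++ [if n % 2 = 1 then '1' else '0'] := by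
  obtain ⟨m, rfl⟩ : ∃ m, n = m + 1 := ⟨n - 1, by omega⟩
  show binCharsGo (m+1) (m+1) = _
  simp only [binCharsGo, if_neg (Nat.succ_ne_zero m)]
  rw [binCharsGo_congr m ((m+1)/2) ((m+1)/2) (by omega) le_rfl]
  rfl

theorem padded_eq (w : Nat) : ∀ n, 0 < n → n < 2 ^ w →
    List.replicate (w - (binChars n).length) '0' ++ binChars n = bitsN w n := by
  induction w with
  | zero => intro n h1 h2; omega
  | succ w ih =>
    intro n h1 h2
    rw [binChars_pos n h1]
    by_cases hq : n / 2 = 0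
    · have hn1 : n = 1 := by omega
      subst hn1
      simp [binChars, binCharsGo, bitsN, bitsN_zero]
    · have hlt : n / 2 < 2 ^ w := by
        have : 2 ^ (w+1) = 2 * 2 ^ w := by ring
        omega
      have ihh := ih (n / 2) (by omega) hlt
      rw [List.length_append, List.length_cons, List.length_nil]
      have hsub : w + 1 - ((binChars (n/2)).length + 1) = w - (binChars (n/2)).length := by omega
      rw [hsub, ← List.append_assoc, ihh, bitsN]

theorem pyFormatBin_eq_bitsN (w n : Nat) (hw : 1 ≤ w) (hn : n < 2 ^ w) :
    pyFormatBin n w = String.ofList (bitsN w n) := by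
  unfold pyFormatBin
  by_cases h0 : n = 0
  · subst h0
    obtain ⟨k, rfl⟩ : ∃ k, w = k + 1 := ⟨w - 1, by omega⟩
    simp [bitsN_zero, List.replicate_succ' (n := k)]
  · simp only [if_neg h0]
    exact congrArg String.ofList (padded_eq w n (Nat.pos_of_ne_zero h0) hn)

theorem bitsN_map_inv (w : Nat) : ∀ n, n < 2 ^ w →
    (bitsN w n).map (fun b => if b == '0' then '1' else '0') = bitsN w (2 ^ w - 1 - n) := by
  induction w with
  | zero => intro n _; rfl
  | succ w ih =>
    intro n hn
    have hpow : 2 ^ (w+1) = 2 * 2 ^ w := by ring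
    have hdiv : (2 ^ (w+1) - 1 - n) / 2 = 2 ^ w - 1 - n / 2 := by omega
    have hmod : (2 ^ (w+1) - 1 - n) % 2 = 1 - n % 2 := by omega
    have hlt : n / 2 < 2 ^ w := by omega
    simp only [bitsN, List.map_append, ih (n/2) hlt, hdiv, hmod, List.map_cons, List.map_nil]
    rcases Nat.mod_two_eq_zero_or_one n with h | h <;> simp [h]

theorem over_eq (v M : Int) :
    (decide (v > M) || decide (v < -M)) = !decide (-M ≤ v ∧ v ≤ M) := by
  by_cases h1 : v > M <;> by_cases h2 : v < -M <;> simp [h1, h2] <;> omega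

theorem mask_shift (w : Nat) (hw : 1 ≤ w) : (2 ^ w - 1) >>> 1 = 2 ^ (w - 1) - 1 := by
  rw [Nat.shiftRight_eq_div_pow, pow_one]
  obtain ⟨k, rfl⟩ : ∃ k, w = k + 1 := ⟨w - 1, by omega⟩
  have : 2 ^ (k+1) = 2 * 2 ^ k := by ring
  simp only [Nat.add_sub_cancel]
  omega

theorem flat_bytes (k : Nat) : ∀ n, n < 2 ^ (8 * k) →
    (toBytesBE k n).flatMap byteBitsTable = bitsN (8 * k) n := by
  induction k with
  | zero => intro n h; interval_cases n; rfl
  | succ k ih =>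
    intro n h
    have hpow : 2 ^ (8 * (k + 1)) = 2 ^ (8 * k) * 256 := by
      rw [show 8 * (k + 1) = 8 * k + 8 by ring, pow_add]; norm_num
    have hdivlt : n / 256 < 2 ^ (8 * k) := by
      rw [hpow] at h; omega
    have hb : byteBitsTable (n % 256) = bitsN 8 (n % 256) := by
      unfold byteBitsTable
      rw [pyFormatBin_eq_bitsN 8 (n % 256) (by norm_num) (by have := Nat.mod_lt n (y := 256) (by norm_num); norm_num; omega)]
      exact String.toList_ofList
    show (toBytesBE k (n / 256) ++ [n % 256]).flatMap byteBitsTable = _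
    rw [List.flatMap_append, ih (n / 256) hdivlt]
    simp only [List.flatMap_cons, List.flatMap_nil, List.append_nil, hb]
    rw [show 8 * (k + 1) = 8 * k + 8 by ring, bitsN_add (8 * k) 8 n]
    norm_num

-- raw[-w:] of Source B's joined byte bits is exactly the w-bit string of code
theorem emit_eq (w code : Nat) (hw : 1 ≤ w) (hc : code < 2 ^ w) :
    PySem.List.slice ((toBytesBE ((w + 7) / 8) code).flatMap byteBitsTable) (some (-(w : Int))) none
      = bitsN w code := by
  set nb := (w + 7) / 8 with hnb
  have hwle : w ≤ 8 * nb := by omega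
  have hclt : code < 2 ^ (8 * nb) := lt_of_lt_of_le hc (Nat.pow_le_pow_right (by norm_num) hwle)
  rw [flat_bytes nb code hclt]
  rw [PySem.List.slice_from_neg_natCast _ _ (by omega : 0 < w)]
  rw [bitsN_length]
  have hsplit : 8 * nb = (8 * nb - w) + w := by omega
  rw [hsplit, bitsN_add (8 * nb - w) w code, Nat.div_eq_of_lt hc, Nat.mod_eq_of_lt hc, bitsN_zero]
  rw [show (8 * nb - w) + w - w = (List.replicate (8 * nb - w) '0').length by simp]
  exact List.drop_left

-- ===== VERDICT (by name: the statement is the Claim_ definition above) =====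
theorem int_to_ones_py_spec : Claim_equal_int_to_ones_py := by
  intro val width nz _dom hpre
  unfold Pre_int_to_ones_py at hpre
  unfold Spec_int_to_ones_py int_to_ones_py int_to_ones_py_alt
  have hw1 : 1 ≤ width.toNat := by omega
  have hw2 : (width - 1).toNat = width.toNat - 1 := by omega
  have hwc : -width = -((width.toNat : Nat) : Int) := by omega
  set w := width.toNat with hw
  have hmaskpos : 1 ≤ 2 ^ w := Nat.one_le_two_pow
  have hMcast : (((2 ^ w - 1 : Nat) >>> 1 : Nat) : Int) = 2 ^ (width - 1).toNat - 1 := by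
    rw [mask_shift w hw1, hw2]
    have h1 : 1 ≤ 2 ^ (w - 1) := Nat.one_le_two_pow
    push_cast [h1]
    ring
  simp only [hMcast, over_eq, hwc]
  by_cases h0 : val = 0
  · simp only [if_pos h0]
    cases nz <;> simp only [Bool.false_eq_true, if_true, if_false]
    · congr 2
      rw [emit_eq w 0 hw1 (by omega), bitsN_zero]
    · congr 2
      rw [emit_eq w (2 ^ w - 1) hw1 (by omega)]
      have hz : 2 ^ w - 1 - 0 = 2 ^ w - 1 := by omega
      rw [← hz, ← bitsN_map_inv w 0 (by omega), bitsN_zero, List.map_replicate]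
      simp
  · simp only [if_neg h0]
    by_cases hp : val > 0
    · simp only [if_pos hp]
      congr 1
      have hland : val.toNat &&& (2 ^ w - 1) < 2 ^ w := by
        have := Nat.and_le_right (n := val.toNat) (m := 2 ^ w - 1); omega
      rw [pyFormatBin_eq_bitsN w _ hw1 hland, emit_eq w _ hw1 hland]
    · simp only [if_neg hp]
      congr 1
      have hland : (-val).toNat &&& (2 ^ w - 1) < 2 ^ w := by
        have := Nat.and_le_right (n := (-val).toNat) (m := 2 ^ w - 1); omega
      have hsub : 2 ^ w - 1 - ((-val).toNat &&& (2 ^ w - 1)) < 2 ^ w := by omega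
      rw [pyFormatBin_eq_bitsN w _ hw1 hland, emit_eq w _ hw1 hsub,
        String.toList_ofList, bitsN_map_inv w _ hland]
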